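-- pv_equiv track=rewrite | github.com/domlee590/Practice-Problems | 828-count-unique-characters-of-all-substrings-of-a-given-string/828-count-unique-characters-of-all-substrings-of-a-given-string.py | uniqueLetterString
-- ===== SOURCE A (Python) =====
-- def uniqueLetterString(s: str) -> int:
--     occurances = [[-1, -1] for i in range(26)]
--
--     current = 0
--     total = 0
--     for i in range(len(s)):
--
--         letter = ord(s[i]) - 65
--
--         secondLast, last = occurances[letter]
--
--         #All strings without letter increase count by 1
--         add = i - last
--
--         #All strings with letter decrease count by 1
--         remove = last - secondLast
--
--         occurances[letter] = [last, i]
--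
--         current += add - remove
--         total += current
--
--     return total
-- ===== SOURCE B (Python) =====
-- def uniqueLetterString(s: str) -> int:
--     # Contribution counting: group the positions of each letter bucket (the same
--     # ord(ch)-65 table index A uses), then each occurrence p of a bucket is the
--     # unique occurrence in exactly (p - prev) * (next - p) substrings.
--     n = len(s)
--     occ = [[] for _ in range(26)]
--     for i, ch in enumerate(s):
--         occ[ord(ch) - 65].append(i)
--     total = 0
--     for ps in occ:
--         prev = -1
--         for p, nxt in zip(ps, ps[1:] + [n]):
--             total += (p - prev) * (nxt - p)
--             prev = p
--     return total
-- ===== Notes on version B (the rewrite author's own statement) =====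
-- stated objective: alternative
-- what changed: B groups the occurrence positions of each letter bucket once and sums each occurrence's direct contribution (p - prev) * (next - p), instead of A's single incremental scan that maintains a running unique-count over substrings ending at each index.
import Mathlib
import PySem

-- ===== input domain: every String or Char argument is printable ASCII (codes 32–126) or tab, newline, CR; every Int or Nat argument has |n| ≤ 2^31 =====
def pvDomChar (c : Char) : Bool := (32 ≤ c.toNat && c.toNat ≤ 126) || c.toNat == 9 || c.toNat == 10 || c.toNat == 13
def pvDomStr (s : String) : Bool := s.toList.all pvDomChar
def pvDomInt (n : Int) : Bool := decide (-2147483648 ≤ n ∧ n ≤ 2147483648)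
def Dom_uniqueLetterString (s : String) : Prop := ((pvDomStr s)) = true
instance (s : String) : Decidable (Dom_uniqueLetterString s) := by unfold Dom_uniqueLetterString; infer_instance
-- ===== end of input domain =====

-- B replaces A's incremental running-unique-count scan by direct contribution counting:
-- for each letter bucket, each occurrence p contributes (p - prev) * (next - p).
-- Same alternative algorithm, similar cost; buckets are the same ord(c)-65 (mod 26)
-- letter index that A's 26-entry table uses.

-- ===== PORT A =====
def uniqueLetterString (s : String) : Int :=
  ((PySem.List.enumerate s.toList 0).foldl
    (fun (st : List (Int × Int) × Int × Int) (ic : Int × Char) =>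
      let letter : Int := (ic.2.toNat : Int) - 65
      let p := PySem.List.pyGetD st.1 letter (-1, -1)
      let add := ic.1 - p.2
      let remove := p.2 - p.1
      let occ' := PySem.List.pySetD st.1 letter (p.2, ic.1)
      let current' := st.2.1 + (add - remove)
      (occ', current', st.2.2 + current'))
    ((List.range 26).map (fun _ => ((-1 : Int), (-1 : Int))), 0, 0)).2.2

-- ===== PORT B =====
def uniqueLetterString_alt (s : String) : Int :=
  let l := s.toList
  let n : Int := l.length
  let occ := (PySem.List.enumerate l 0).foldl
    (fun (occ : List (List Int)) (ic : Int × Char) =>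
      let letter : Int := (ic.2.toNat : Int) - 65
      PySem.List.pySetD occ letter (PySem.List.pyGetD occ letter [] ++ [ic.1]))
    ((List.range 26).map (fun _ => ([] : List Int)))
  occ.foldl (fun total ps =>
    ((ps.zip (PySem.List.slice ps (some 1) none ++ [n])).foldl
      (fun (st : Int × Int) pn => (st.1 + (pn.1 - st.2) * (pn.2 - pn.1), pn.1)) (total, -1)).1) 0

-- ===== PRECONDITION & SPEC =====
-- Pre_ admits exactly the inputs on which the Python A returns: on a character with
-- code < 39 or > 90 the table index ord(c)-65 is outside [-26, 25] and A raises IndexError.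
def Pre_uniqueLetterString (s : String) : Prop :=
  (s.toList.all (fun c => 39 ≤ c.toNat && c.toNat ≤ 90)) = true
instance (s : String) : Decidable (Pre_uniqueLetterString s) := by
  unfold Pre_uniqueLetterString; infer_instance

def pvWitness_uniqueLetterString : String := "BANANA"

def Spec_uniqueLetterString (s : String) (out : Int) : Prop := out = uniqueLetterString_alt s
instance (s : String) (out : Int) : Decidable (Spec_uniqueLetterString s out) := by
  unfold Spec_uniqueLetterString; infer_instance

-- ===== CLAIM (what is proved, stated in full; the proofs are below) =====
def Claim_equal_uniqueLetterString : Prop := ∀ (s : String), Dom_uniqueLetterString s → Pre_uniqueLetterString s → Spec_uniqueLetterString s (uniqueLetterString s)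

-- ===== LEMMAS AND PROOFS =====

def pvKey (c : Char) : Int := PySem.Int.mod ((c.toNat : Int) - 65) 26
-- occurrence positions (as Python ints) of bucket b in l
def pvOcc (b : Nat) (l : List Char) : List Int :=
  (PySem.List.enumerate l 0).filterMap
    (fun ic => if pvKey ic.2 = (b : Int) then some ic.1 else none)

-- last two elements of ps (with defaults from init), as A's table keeps them
def pvLast2 (init : Int × Int) (ps : List Int) : Int × Int :=
  ps.foldl (fun q p => (q.2, p)) init

def pvLL (b : Nat) (l : List Char) : Int × Int := pvLast2 (-1, -1) (pvOcc b l)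

-- B's per-bucket contribution sum, recursively
def pvFF (prev : Int) (ps : List Int) (bound : Int) : Int :=
  match ps with
  | [] => 0
  | p :: rest => (p - prev) * ((rest.head?.getD bound) - p) + pvFF p rest bound

def pvSB (l : List Char) : Int :=
  ((List.range 26).map (fun b => pvFF (-1) (pvOcc b l) (l.length : Int))).sum

def pvCUR (l : List Char) : Int :=
  ((List.range 26).map (fun b => (pvLL b l).2 - (pvLL b l).1)).sum

def pvTable (l : List Char) : List (Int × Int) := (List.range 26).map (fun b => pvLL b l)

theorem pvLast2_append_singleton (q : Int × Int) (ps : List Int) (n : Int) :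
    pvLast2 q (ps ++ [n]) = ((pvLast2 q ps).2, n) := by
  simp [pvLast2, List.foldl_append]

theorem pvKey_eq_emod (c : Char) : pvKey c = ((c.toNat : Int) - 65) % 26 := by
  exact PySem.Int.mod_eq_emod_of_pos (by norm_num)

theorem pvKey_nonneg (c : Char) : 0 ≤ pvKey c := by
  rw [pvKey_eq_emod]; exact Int.emod_nonneg _ (by norm_num)

theorem pvKey_lt (c : Char) : pvKey c < 26 := by
  rw [pvKey_eq_emod]; exact Int.emod_lt_of_pos _ (by norm_num)


theorem pvFF_bound_succ : ∀ (ps : List Int) (prev bound : Int),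
    pvFF prev ps (bound + 1)
      = pvFF prev ps bound + ((pvLast2 (prev, prev) ps).2 - (pvLast2 (prev, prev) ps).1) := by
  intro ps
  induction ps with
  | nil => intro prev bound; simp [pvFF, pvLast2]
  | cons p rest ih =>
    intro prev bound
    cases rest with
    | nil =>
      have e : ∀ t : Int, pvFF prev [p] t = (p - prev) * (t - p) := by
        intro t; simp [pvFF]
      rw [e, e, show pvLast2 (prev, prev) [p] = (prev, p) from rfl]
      ring
    | cons r rs =>
      rw [show pvFF prev (p :: r :: rs) (bound + 1)
            = (p - prev) * (r - p) + pvFF p (r :: rs) (bound + 1) from rfl,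
          show pvFF prev (p :: r :: rs) bound
            = (p - prev) * (r - p) + pvFF p (r :: rs) bound from rfl,
          ih p bound,
          show pvLast2 (prev, prev) (p :: r :: rs) = pvLast2 (p, p) (r :: rs) from rfl]
      ring

theorem pvFF_append : ∀ (ps : List Int) (prev q bound : Int),
    pvFF prev (ps ++ [q]) bound
      = pvFF prev ps q + (q - (pvLast2 (prev, prev) ps).2) * (bound - q) := by
  intro ps
  induction ps with
  | nil =>
    intro prev q bound
    rw [show ([] : List Int) ++ [q] = [q] from rfl,
        show pvFF prev [q] bound = (q - prev) * (bound - q) from by simp [pvFF],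
        show pvFF prev [] q = 0 from rfl,
        show pvLast2 (prev, prev) ([] : List Int) = (prev, prev) from rfl]
    ring
  | cons p rest ih =>
    intro prev q bound
    cases rest with
    | nil =>
      rw [show (([p] : List Int) ++ [q]) = [p, q] from rfl,
          show pvFF prev [p, q] bound = (p - prev) * (q - p) + (q - p) * (bound - q) from by
            simp [pvFF],
          show pvFF prev [p] q = (p - prev) * (q - p) + 0 from by simp [pvFF],
          show pvLast2 (prev, prev) [p] = (prev, p) from rfl]
      ring
    | cons r rs =>
      rw [show ((p :: r :: rs) ++ [q]) = p :: ((r :: rs) ++ [q]) from rfl,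
          show pvFF prev (p :: ((r :: rs) ++ [q])) bound
            = (p - prev) * (r - p) + pvFF p ((r :: rs) ++ [q]) bound from rfl,
          ih p q bound,
          show pvFF prev (p :: r :: rs) q
            = (p - prev) * (r - p) + pvFF p (r :: rs) q from rfl,
          show pvLast2 (prev, prev) (p :: r :: rs) = pvLast2 (p, p) (r :: rs) from rfl]
      ring

theorem pv_inner : ∀ (ps : List Int) (prev total bound : Int),
    ((ps.zip (ps.drop 1 ++ [bound])).foldl
      (fun (st : Int × Int) pn => (st.1 + (pn.1 - st.2) * (pn.2 - pn.1), pn.1)) (total, prev)).1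
      = total + pvFF prev ps bound := by
  intro ps
  induction ps with
  | nil => intro prev total bound; simp [pvFF]
  | cons p rest ih =>
    intro prev total bound
    cases rest with
    | nil => simp [pvFF]
    | cons r rs =>
      have hz : ((p :: r :: rs).zip ((p :: r :: rs).drop 1 ++ [bound]))
          = (p, r) :: ((r :: rs).zip ((r :: rs).drop 1 ++ [bound])) := by simp
      rw [hz, List.foldl_cons]
      dsimp only
      rw [ih p (total + (p - prev) * (r - p)) bound,
          show pvFF prev (p :: r :: rs) bound
            = (p - prev) * (r - p) + pvFF p (r :: rs) bound from rfl]
      ring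
theorem pv_getD_table {α : Type} (xs : List α) (h : xs.length = 26) (c : Char)
    (h39 : 39 ≤ c.toNat) (h90 : c.toNat ≤ 90) (d : α) :
    PySem.List.pyGetD xs ((c.toNat : Int) - 65) d = xs.getD (pvKey c).toNat d := by
  by_cases h0 : 0 ≤ (c.toNat : Int) - 65
  · have hk : pvKey c = (c.toNat : Int) - 65 := by rw [pvKey_eq_emod]; omega
    rw [PySem.List.pyGetD_eq_getElem (xs := xs) (d := d) h0 (by omega),
        List.getD_eq_getElem (hn := by omega)]
    congr 1
    omega
  · have hk : pvKey c = (c.toNat : Int) - 65 + 26 := by rw [pvKey_eq_emod]; omega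
    have hk1 : 0 < (65 - (c.toNat : Int)).toNat := by omega
    have hk2 : (65 - (c.toNat : Int)).toNat ≤ xs.length := by omega
    have e := PySem.List.pyGetD_neg_natCast (xs := xs) (k := (65 - (c.toNat : Int)).toNat)
      (d := d) hk1 hk2
    rw [show -(((65 - (c.toNat : Int)).toNat : Int)) = (c.toNat : Int) - 65 by omega] at e
    rw [e, List.getD_eq_getElem (hn := by omega)]
    congr 1
    omega

theorem pv_setD_table {α : Type} (xs : List α) (h : xs.length = 26) (c : Char)
    (h39 : 39 ≤ c.toNat) (h90 : c.toNat ≤ 90) (v : α) :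
    PySem.List.pySetD xs ((c.toNat : Int) - 65) v = xs.set (pvKey c).toNat v := by
  have hke : pvKey c = ((c.toNat : Int) - 65) % 26 := pvKey_eq_emod c
  unfold PySem.List.pySetD PySem.List.pySet? PySem.List.pyIdx?
  split_ifs <;> simp_all <;> try omega
  all_goals (congr 1; omega)

theorem pv_getD_map_range {α : Type} (m K : Nat) (hK : K < m) (f : Nat → α) (d : α) :
    ((List.range m).map f).getD K d = f K := by
  rw [List.getD_eq_getElem (hn := by simpa using hK)]
  simp

theorem pv_set_map_range {α : Type} (m K : Nat) (_hK : K < m) (f : Nat → α) (v : α) :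
    ((List.range m).map f).set K v = (List.range m).map (fun b => if b = K then v else f b) := by
  apply List.ext_getElem (by simp)
  intro i h1 h2
  simp only [List.getElem_set, List.getElem_map, List.getElem_range]
  by_cases hi : K = i
  · subst hi; simp
  · rw [if_neg hi, if_neg (by omega)]

theorem pv_sum_update (m K : Nat) (hK : K < m) (g g' : Nat → Int)
    (hne : ∀ b, b ≠ K → g' b = g b) :
    ((List.range m).map g').sum = ((List.range m).map g).sum + (g' K - g K) := by
  induction m with
  | zero => omega
  | succ m ih =>
    rw [List.range_succ, List.map_append, List.map_append, List.sum_append, List.sum_append]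
    by_cases hKm : K = m
    · subst hKm
      have he : (List.range K).map g' = (List.range K).map g := by
        apply List.map_congr_left
        intro x hx
        exact hne x (by simp at hx; omega)
      rw [he]
      simp
    · rw [show (List.map g' [m]).sum = g' m from by simp,
          show (List.map g [m]).sum = g m from by simp, hne m (Ne.symm hKm), ih (by omega)]
      ring

theorem pv_sum_add (m : Nat) (g d : Nat → Int) :
    ((List.range m).map (fun b => g b + d b)).sum
      = ((List.range m).map g).sum + ((List.range m).map d).sum := by
  induction m with
  | zero => simp
  | succ m ih =>
    rw [List.range_succ]
    simp only [List.map_append, List.sum_append, ih]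
    simp
    ring

theorem pvOcc_append (b : Nat) (l : List Char) (c : Char) :
    pvOcc b (l ++ [c]) = pvOcc b l ++ (if pvKey c = (b : Int) then [(l.length : Int)] else []) := by
  unfold pvOcc
  rw [PySem.List.enumerate_append, List.filterMap_append]
  congr 1
  rw [PySem.List.enumerate_cons, PySem.List.enumerate_nil]
  by_cases hc : pvKey c = (b : Int) <;> simp [hc]

theorem pvLL_append (b : Nat) (l : List Char) (c : Char) :
    pvLL b (l ++ [c])
      = if pvKey c = (b : Int) then ((pvLL b l).2, (l.length : Int)) else pvLL b l := by
  unfold pvLL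
  rw [pvOcc_append]
  by_cases hc : pvKey c = (b : Int)
  · rw [if_pos hc, if_pos hc, pvLast2_append_singleton]
  · rw [if_neg hc, if_neg hc, List.append_nil]

theorem pvKey_toNat_cast (c : Char) : (((pvKey c).toNat : Nat) : Int) = pvKey c := by
  have := pvKey_nonneg c
  omega

theorem pvCUR_append (l : List Char) (c : Char) :
    pvCUR (l ++ [c])
      = pvCUR l + (((l.length : Int) - (pvLL (pvKey c).toNat l).2)
          - ((pvLL (pvKey c).toNat l).2 - (pvLL (pvKey c).toNat l).1)) := by
  have hK : (pvKey c).toNat < 26 := by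
    have h1 := pvKey_lt c; have h2 := pvKey_nonneg c; omega
  unfold pvCUR
  rw [pv_sum_update 26 (pvKey c).toNat hK
      (fun b => (pvLL b l).2 - (pvLL b l).1)
      (fun b => (pvLL b (l ++ [c])).2 - (pvLL b (l ++ [c])).1)
      (by
        intro b hb
        dsimp only
        rw [pvLL_append, if_neg]
        intro he
        exact hb (by have := pvKey_nonneg c; omega))]
  rw [pvLL_append, if_pos (pvKey_toNat_cast c).symm]

theorem pvSB_append (l : List Char) (c : Char) :
    pvSB (l ++ [c]) = pvSB l + pvCUR (l ++ [c]) := by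
  unfold pvSB
  have hterm : ∀ b : Nat,
      pvFF (-1) (pvOcc b (l ++ [c])) (((l ++ [c]).length : Int))
        = pvFF (-1) (pvOcc b l) ((l.length : Int))
            + ((pvLL b (l ++ [c])).2 - (pvLL b (l ++ [c])).1) := by
    intro b
    rw [show (((l ++ [c]).length : Nat) : Int) = (l.length : Int) + 1 from by simp]
    rw [pvOcc_append, pvLL_append]
    by_cases hc : pvKey c = (b : Int)
    · rw [if_pos hc, if_pos hc, pvFF_append]
      show pvFF (-1) (pvOcc b l) (l.length : Int)
          + ((l.length : Int) - (pvLast2 (-1, -1) (pvOcc b l)).2) * ((l.length : Int) + 1 - (l.length : Int))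
        = _
      unfold pvLL
      ring
    · rw [if_neg hc, if_neg hc, List.append_nil, pvFF_bound_succ]
      rfl
  have hmap : (List.range 26).map
        (fun b => pvFF (-1) (pvOcc b (l ++ [c])) (((l ++ [c]).length : Int)))
      = (List.range 26).map
        (fun b => pvFF (-1) (pvOcc b l) ((l.length : Int))
            + ((pvLL b (l ++ [c])).2 - (pvLL b (l ++ [c])).1)) :=
    List.map_congr_left (fun b _ => hterm b)
  rw [hmap, pv_sum_add 26 (fun b => pvFF (-1) (pvOcc b l) ((l.length : Int)))
      (fun b => (pvLL b (l ++ [c])).2 - (pvLL b (l ++ [c])).1)]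
  rfl

theorem pvTable_length (l : List Char) : (pvTable l).length = 26 := by simp [pvTable]

theorem pvTable_append (l : List Char) (c : Char) :
    pvTable (l ++ [c])
      = (pvTable l).set (pvKey c).toNat ((pvLL (pvKey c).toNat l).2, (l.length : Int)) := by
  have hK : (pvKey c).toNat < 26 := by
    have h1 := pvKey_lt c; have h2 := pvKey_nonneg c; omega
  unfold pvTable
  rw [pv_set_map_range 26 (pvKey c).toNat hK]
  apply List.map_congr_left
  intro b _
  rw [pvLL_append]
  by_cases hb : b = (pvKey c).toNat
  · subst hb; rw [if_pos (pvKey_toNat_cast c).symm, if_pos rfl]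
  · rw [if_neg (by intro he; exact hb (by have := pvKey_nonneg c; omega)), if_neg hb]

theorem pvOccTable_state (l : List Char) (hpre : ∀ c ∈ l, 39 ≤ c.toNat ∧ c.toNat ≤ 90) :
    (PySem.List.enumerate l 0).foldl
      (fun (occ : List (List Int)) (ic : Int × Char) =>
        let letter : Int := (ic.2.toNat : Int) - 65
        PySem.List.pySetD occ letter (PySem.List.pyGetD occ letter [] ++ [ic.1]))
      ((List.range 26).map (fun _ => ([] : List Int)))
      = (List.range 26).map (fun b => pvOcc b l) := by
  induction l using List.reverseRecOn with
  | nil => decide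
  | append_singleton l c ih =>
    have hpre' : ∀ x ∈ l, 39 ≤ x.toNat ∧ x.toNat ≤ 90 := fun x hx => hpre x (by simp [hx])
    have hc : 39 ≤ c.toNat ∧ c.toNat ≤ 90 := hpre c (by simp)
    have hK : (pvKey c).toNat < 26 := by
      have h1 := pvKey_lt c; have h2 := pvKey_nonneg c; omega
    rw [PySem.List.enumerate_append, List.foldl_append, ih hpre',
        PySem.List.enumerate_cons, PySem.List.enumerate_nil, List.foldl_cons, List.foldl_nil]
    simp only [zero_add]
    rw [pv_getD_table ((List.range 26).map (fun b => pvOcc b l)) (by simp) c hc.1 hc.2,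
        pv_setD_table ((List.range 26).map (fun b => pvOcc b l)) (by simp) c hc.1 hc.2,
        pv_getD_map_range 26 (pvKey c).toNat hK, pv_set_map_range 26 (pvKey c).toNat hK]
    apply List.map_congr_left
    intro b _
    rw [pvOcc_append]
    by_cases hb : b = (pvKey c).toNat
    · subst hb; rw [if_pos (pvKey_toNat_cast c).symm, if_pos rfl]
    · rw [if_neg hb,
          if_neg (show ¬(pvKey c = (b : Int)) from
            fun he => hb (by have := pvKey_nonneg c; omega)),
          List.append_nil]

theorem pvB_eq (s : String) (hpre : ∀ c ∈ s.toList, 39 ≤ c.toNat ∧ c.toNat ≤ 90) :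
    uniqueLetterString_alt s = pvSB s.toList := by
  have hB : uniqueLetterString_alt s
      = ((PySem.List.enumerate s.toList 0).foldl
          (fun (occ : List (List Int)) (ic : Int × Char) =>
            let letter : Int := (ic.2.toNat : Int) - 65
            PySem.List.pySetD occ letter (PySem.List.pyGetD occ letter [] ++ [ic.1]))
          ((List.range 26).map (fun _ => ([] : List Int)))).foldl
        (fun (total : Int) (ps : List Int) =>
          ((ps.zip (PySem.List.slice ps (some 1) none ++ [(s.toList.length : Int)])).foldl
            (fun (st : Int × Int) pn => (st.1 + (pn.1 - st.2) * (pn.2 - pn.1), pn.1))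
            (total, -1)).1) 0 := rfl
  rw [hB, pvOccTable_state s.toList hpre]
  have hgen : ∀ (pss : List (List Int)) (t0 : Int),
      pss.foldl
        (fun (total : Int) (ps : List Int) =>
          ((ps.zip (PySem.List.slice ps (some 1) none ++ [(s.toList.length : Int)])).foldl
            (fun (st : Int × Int) pn => (st.1 + (pn.1 - st.2) * (pn.2 - pn.1), pn.1))
            (total, -1)).1) t0
        = t0 + (pss.map (fun ps => pvFF (-1) ps ((s.toList.length : Int)))).sum := by
    intro pss
    induction pss with
    | nil => intro t0; simp
    | cons ps pss ih =>
      intro t0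
      have hsl : PySem.List.slice ps (some 1) none = ps.drop 1 := by
        simp [PySem.List.slice_from]
      rw [List.foldl_cons, ih, hsl, pv_inner]
      simp only [List.map_cons, List.sum_cons]
      ring
  rw [hgen (((List.range 26)).map (fun b => pvOcc b s.toList)) 0, List.map_map]
  rw [show pvSB s.toList
      = ((List.range 26).map (fun b => pvFF (-1) (pvOcc b s.toList) ((s.toList.length : Int)))).sum
      from rfl]
  simp [Function.comp_def]

theorem pvA_state (l : List Char) (hpre : ∀ c ∈ l, 39 ≤ c.toNat ∧ c.toNat ≤ 90) :
    (PySem.List.enumerate l 0).foldl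
      (fun (st : List (Int × Int) × Int × Int) (ic : Int × Char) =>
        let letter : Int := (ic.2.toNat : Int) - 65
        let p := PySem.List.pyGetD st.1 letter (-1, -1)
        let add := ic.1 - p.2
        let remove := p.2 - p.1
        let occ' := PySem.List.pySetD st.1 letter (p.2, ic.1)
        let current' := st.2.1 + (add - remove)
        (occ', current', st.2.2 + current'))
      ((List.range 26).map (fun _ => ((-1 : Int), (-1 : Int))), 0, 0)
      = (pvTable l, pvCUR l, pvSB l) := by
  induction l using List.reverseRecOn with
  | nil => decide
  | append_singleton l c ih =>
    have hpre' : ∀ x ∈ l, 39 ≤ x.toNat ∧ x.toNat ≤ 90 := fun x hx => hpre x (by simp [hx])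
    have hc : 39 ≤ c.toNat ∧ c.toNat ≤ 90 := hpre c (by simp)
    rw [PySem.List.enumerate_append, List.foldl_append, ih hpre',
        PySem.List.enumerate_cons, PySem.List.enumerate_nil, List.foldl_cons, List.foldl_nil]
    simp only [zero_add]
    rw [pv_getD_table (pvTable l) (pvTable_length l) c hc.1 hc.2,
        pv_setD_table (pvTable l) (pvTable_length l) c hc.1 hc.2]
    rw [show (pvTable l).getD (pvKey c).toNat (-1, -1) = pvLL (pvKey c).toNat l from by
      unfold pvTable
      exact pv_getD_map_range 26 (pvKey c).toNat
        (by have h1 := pvKey_lt c; have h2 := pvKey_nonneg c; omega) _ _]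
    rw [pvTable_append, pvCUR_append, pvSB_append, pvCUR_append]

-- ===== VERDICT (by name: the statement is the Claim_ definition above) =====
theorem pvPre_chars (s : String) (h : Pre_uniqueLetterString s) :
    ∀ c ∈ s.toList, 39 ≤ c.toNat ∧ c.toNat ≤ 90 := by
  unfold Pre_uniqueLetterString at h
  simpa [List.all_eq_true] using h

theorem uniqueLetterString_spec : Claim_equal_uniqueLetterString := by
  intro s _hdom hpre
  unfold Spec_uniqueLetterString
  rw [pvB_eq s (pvPre_chars s hpre)]
  unfold uniqueLetterString
  rw [pvA_state s.toList (pvPre_chars s hpre)]
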